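-- pv_equiv track=rewrite | github.com/SashaChuma/LeetCode | 2818. Apply Operations to Maximize Score.py | count_subsequent_lower_or_equal
-- ===== SOURCE A (Python) =====
-- def count_subsequent_lower_or_equal(arr):
--     n = len(arr)
--     result = [0] * n
--     stack = []
--
--     for i in range(n - 1, -1, -1):
--         count = 0
--         while stack and arr[i] >= arr[stack[-1]]:
--             idx = stack.pop()
--             count += 1 + result[idx]
--
--         result[i] = count
--         stack.append(i)
--
--     return result
-- ===== SOURCE B (Python) =====
-- def count_subsequent_lower_or_equal(arr):
--     # Next-greater jump pointers: res[i] = (index of next strictly greater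
--     # element to the right, or n) - i - 1; j + res[j] + 1 is that index for j,
--     # so the while loop jumps over already-counted blocks instead of a stack.
--     n = len(arr)
--     res = [0] * n
--     for i in range(n - 1, -1, -1):
--         j = i + 1
--         while j < n and arr[j] <= arr[i]:
--             j += res[j] + 1
--         res[i] = j - i - 1
--     return res
-- ===== Notes on version B (the rewrite author's own statement) =====
-- stated objective: alternative
-- what changed: Replaces the monotonic stack with next-greater jump pointers: res[i] = (next strictly-greater index) - i - 1, found by jumping j += res[j] + 1, so no stack is maintained.
import Mathlib
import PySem

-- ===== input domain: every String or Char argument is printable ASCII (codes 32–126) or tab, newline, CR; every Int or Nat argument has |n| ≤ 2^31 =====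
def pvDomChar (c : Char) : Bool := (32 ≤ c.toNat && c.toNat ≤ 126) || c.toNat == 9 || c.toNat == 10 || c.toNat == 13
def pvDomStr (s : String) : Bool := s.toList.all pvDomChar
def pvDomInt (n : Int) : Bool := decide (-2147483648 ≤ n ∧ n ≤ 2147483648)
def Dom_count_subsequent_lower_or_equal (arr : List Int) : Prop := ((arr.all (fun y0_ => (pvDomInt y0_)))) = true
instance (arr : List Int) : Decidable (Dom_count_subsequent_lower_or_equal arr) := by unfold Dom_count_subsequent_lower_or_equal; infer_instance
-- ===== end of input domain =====

-- B replaces A's monotonic stack by next-greater jump pointers over the result array; same cost, no stack.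

-- ===== PORT A =====
-- the Python while-loop popping the stack; the stack is kept head-first (head = Python's stack[-1]);
-- indices stored in the stack are always in range, so getD is exact
def csleA_pop (arr result : List Int) (v : Int) : List Nat → Int → Int × List Nat
  | [], count => (count, [])
  | idx :: rest, count =>
    if arr.getD idx 0 ≤ v then
      csleA_pop arr result v rest (count + 1 + result.getD idx 0)
    else (count, idx :: rest)

-- the Python for-loop over i = n-1 .. 0 (counter k+1 means i = k)
def csleA_outer (arr : List Int) : Nat → List Int → List Nat → List Int
  | 0, result, _ => result
  | k+1, result, stack =>
    let p := csleA_pop arr result (arr.getD k 0) stack 0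
    csleA_outer arr k (result.set k p.1) (k :: p.2)

def count_subsequent_lower_or_equal (arr : List Int) : List Int :=
  csleA_outer arr arr.length (List.replicate arr.length 0) []

-- ===== PORT B =====
-- the inner while loop 'while j < n and arr[j] <= arr[i]: j += res[j] + 1'.
-- j is always ≥ 0 so it is kept as Nat; fuel (= n, strictly more than the
-- possible number of jumps, since j strictly increases) only makes it total.
def csleB_jump (arr res : List Int) (v : Int) (n : Nat) : Nat → Nat → Nat
  | 0, j => j
  | f+1, j =>
    if j < n ∧ arr.getD j 0 ≤ v then csleB_jump arr res v n f (j + (res.getD j 0).toNat + 1)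
    else j

-- the for-loop over i = n-1 .. 0 (counter k+1 means i = k)
def csleB_outer (arr : List Int) (n : Nat) : Nat → List Int → List Int
  | 0, res => res
  | k+1, res =>
    let j := csleB_jump arr res (arr.getD k 0) n n (k+1)
    csleB_outer arr n k (res.set k ((j : Int) - k - 1))

def count_subsequent_lower_or_equal_alt (arr : List Int) : List Int :=
  csleB_outer arr arr.length arr.length (List.replicate arr.length 0)

-- ===== PRECONDITION & SPEC =====
def Spec_count_subsequent_lower_or_equal (arr : List Int) (out : List Int) : Prop := out = count_subsequent_lower_or_equal_alt arr
instance (arr : List Int) (out : List Int) : Decidable (Spec_count_subsequent_lower_or_equal arr out) := by unfold Spec_count_subsequent_lower_or_equal; infer_instance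

-- ===== CLAIM (what is proved, stated in full; the proofs are below) =====
def Claim_equal_count_subsequent_lower_or_equal : Prop := ∀ (arr : List Int), Dom_count_subsequent_lower_or_equal arr → Spec_count_subsequent_lower_or_equal arr (count_subsequent_lower_or_equal arr)

-- ===== LEMMAS AND PROOFS =====

-- number of leading elements ≤ v
def takeCount (v : Int) : List Int → Int
  | [] => 0
  | w :: l => if w ≤ v then 1 + takeCount v l else 0

-- the intended value of result[i]
def specCnt (arr : List Int) (i : Nat) : Int := takeCount (arr.getD i 0) (arr.drop (i+1))

-- index of the next strictly greater element (or past the end)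
def ngeIdx (arr : List Int) (i : Nat) : Nat := i + 1 + (specCnt arr i).toNat

lemma takeCount_nonneg (v : Int) (l : List Int) : 0 ≤ takeCount v l := by
  induction l with
  | nil => simp [takeCount]
  | cons w l ih => simp only [takeCount]; split <;> omega

lemma ngeIdx_gt (arr : List Int) (i : Nat) : i < ngeIdx arr i := by
  unfold ngeIdx; omega

-- first-greater index starting from j, following ngeIdx
def skipIdx (arr : List Int) (v : Int) (j : Nat) : Nat :=
  if h : j < arr.length ∧ arr.getD j 0 ≤ v then skipIdx arr v (ngeIdx arr j)
  else j
termination_by arr.length - j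
decreasing_by have := ngeIdx_gt arr j; omega

-- the stack A keeps (head-first) after having processed indices ≥ j
def chainL (arr : List Int) (j : Nat) : List Nat :=
  if h : j < arr.length then j :: chainL arr (ngeIdx arr j)
  else []
termination_by arr.length - j
decreasing_by have := ngeIdx_gt arr j; omega

lemma drop_cons_getD (arr : List Int) (j : Nat) (h : j < arr.length) :
    arr.drop j = arr.getD j 0 :: arr.drop (j+1) := by
  rw [List.getD_eq_getElem arr 0 h]
  exact List.drop_eq_getElem_cons h

lemma takeCount_append (v : Int) (l1 l2 : List Int) (h : ∀ x ∈ l1, x ≤ v) :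
    takeCount v (l1 ++ l2) = l1.length + takeCount v l2 := by
  induction l1 with
  | nil => simp
  | cons w l ih =>
    have hw : w ≤ v := h w (by simp)
    simp only [List.cons_append, takeCount, if_pos hw,
      ih (fun x hx => h x (by simp [hx])), List.length_cons]
    push_cast; ring

lemma takeCount_eq_takeWhile (v : Int) (l : List Int) :
    takeCount v l = ((l.takeWhile (fun x => decide (x ≤ v))).length : Int) := by
  induction l with
  | nil => simp [takeCount]
  | cons w l ih =>
    by_cases hw : w ≤ v
    · simp [takeCount, List.takeWhile_cons, hw, ih]; ring
    · simp [takeCount, List.takeWhile_cons, hw]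

lemma drop_takeCount (v : Int) (l : List Int) :
    l.drop (takeCount v l).toNat = l.dropWhile (fun x => decide (x ≤ v)) := by
  induction l with
  | nil => simp
  | cons w l ih =>
    by_cases hw : w ≤ v
    · have h1 : takeCount v (w :: l) = 1 + takeCount v l := by simp [takeCount, hw]
      have h2 : (1 + takeCount v l).toNat = (takeCount v l).toNat + 1 := by
        have := takeCount_nonneg v l; omega
      simp [h1, h2, List.dropWhile_cons, hw, ih]
    · have h1 : takeCount v (w :: l) = 0 := by simp [takeCount, hw]
      simp [h1, List.dropWhile_cons, hw]

-- the jump: everything counted for w (≤ v) is also counted for v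
lemma takeCount_jump (v w : Int) (l : List Int) (hwv : w ≤ v) :
    takeCount v (w :: l) = 1 + takeCount w l + takeCount v (l.drop (takeCount w l).toNat) := by
  have hsplit : l = l.takeWhile (fun x => decide (x ≤ w)) ++ l.dropWhile (fun x => decide (x ≤ w)) :=
    (List.takeWhile_append_dropWhile).symm
  have hmem : ∀ x ∈ l.takeWhile (fun x => decide (x ≤ w)), x ≤ v := by
    intro x hx
    have := List.mem_takeWhile_imp hx
    simp at this; omega
  calc takeCount v (w :: l) = 1 + takeCount v l := by simp [takeCount, hwv]
    _ = 1 + takeCount v (l.takeWhile (fun x => decide (x ≤ w)) ++ l.dropWhile (fun x => decide (x ≤ w))) := by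
          rw [← hsplit]
    _ = 1 + ((l.takeWhile (fun x => decide (x ≤ w))).length + takeCount v (l.dropWhile (fun x => decide (x ≤ w)))) := by
          rw [takeCount_append v _ _ hmem]
    _ = 1 + takeCount w l + takeCount v (l.drop (takeCount w l).toNat) := by
          rw [drop_takeCount w l, takeCount_eq_takeWhile w l]; ring

lemma takeCount_drop_jump (arr : List Int) (v : Int) (j : Nat)
    (hj : j < arr.length) (hle : arr.getD j 0 ≤ v) :
    takeCount v (arr.drop j) = 1 + specCnt arr j + takeCount v (arr.drop (ngeIdx arr j)) := by
  have hd : arr.drop (ngeIdx arr j) = (arr.drop (j+1)).drop (specCnt arr j).toNat := by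
    rw [List.drop_drop]
    rfl
  rw [drop_cons_getD arr j hj, takeCount_jump v _ _ hle, hd]
  simp only [specCnt]

lemma takeCount_drop_stop (arr : List Int) (v : Int) (j : Nat)
    (hj : j < arr.length) (hgt : ¬ arr.getD j 0 ≤ v) :
    takeCount v (arr.drop j) = 0 := by
  rw [drop_cons_getD arr j hj]; simp only [takeCount, if_neg hgt]

lemma takeCount_drop_end (arr : List Int) (v : Int) (j : Nat) (hj : arr.length ≤ j) :
    takeCount v (arr.drop j) = 0 := by
  rw [List.drop_eq_nil_of_le hj]; rfl


lemma chainL_cons (arr : List Int) (j : Nat) (h : j < arr.length) :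
    chainL arr j = j :: chainL arr (ngeIdx arr j) := by
  rw [chainL, dif_pos h]

lemma chainL_nil (arr : List Int) (j : Nat) (h : ¬ j < arr.length) :
    chainL arr j = [] := by
  rw [chainL, dif_neg h]

lemma skipIdx_step (arr : List Int) (v : Int) (j : Nat)
    (h : j < arr.length) (hle : arr.getD j 0 ≤ v) :
    skipIdx arr v j = skipIdx arr v (ngeIdx arr j) := by
  conv_lhs => rw [skipIdx]
  rw [dif_pos ⟨h, hle⟩]

lemma skipIdx_stop (arr : List Int) (v : Int) (j : Nat)
    (h : ¬ (j < arr.length ∧ arr.getD j 0 ≤ v)) :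
    skipIdx arr v j = j := by
  rw [skipIdx, dif_neg h]

lemma skipIdx_eq (arr : List Int) (v : Int) : ∀ fuel j, arr.length - j ≤ fuel →
    skipIdx arr v j = j + (takeCount v (arr.drop j)).toNat := by
  intro fuel
  induction fuel with
  | zero =>
    intro j hf
    have hj : arr.length ≤ j := by omega
    rw [takeCount_drop_end arr v j hj, skipIdx_stop arr v j (by omega)]
    simp
  | succ f ih =>
    intro j hf
    by_cases hj : j < arr.length
    · by_cases hle : arr.getD j 0 ≤ v
      · rw [skipIdx_step arr v j hj hle]
        rw [ih (ngeIdx arr j) (by have := ngeIdx_gt arr j; omega)]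
        rw [takeCount_drop_jump arr v j hj hle]
        have h1 := takeCount_nonneg v (arr.drop (ngeIdx arr j))
        have h2 := takeCount_nonneg (arr.getD j 0) (arr.drop (j+1))
        unfold ngeIdx specCnt at *
        omega
      · rw [skipIdx_stop arr v j (by tauto), takeCount_drop_stop arr v j hj hle]
        simp
    · rw [takeCount_drop_end arr v j (by omega), skipIdx_stop arr v j (by tauto)]
      simp

-- the pop loop consumes the chain down to the first strictly greater element
lemma pop_chain (arr : List Int) (v : Int) : ∀ fuel j (r : List Int) (c : Int),
    arr.length - j ≤ fuel →
    (∀ m, j ≤ m → m < arr.length → r.getD m 0 = specCnt arr m) →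
    csleA_pop arr r v (chainL arr j) c =
      (c + takeCount v (arr.drop j), chainL arr (skipIdx arr v j)) := by
  intro fuel
  induction fuel with
  | zero =>
    intro j r c hf hr
    have hj : ¬ j < arr.length := by omega
    rw [skipIdx_stop arr v j (by tauto), chainL_nil arr j hj,
      takeCount_drop_end arr v j (by omega)]
    simp [csleA_pop]
  | succ f ih =>
    intro j r c hf hr
    by_cases hj : j < arr.length
    · rw [chainL_cons arr j hj]
      by_cases hle : arr.getD j 0 ≤ v
      · simp only [csleA_pop, if_pos hle]
        rw [hr j le_rfl hj]
        rw [ih (ngeIdx arr j) r (c + 1 + specCnt arr j)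
          (by have := ngeIdx_gt arr j; omega)
          (fun m hm hm' => hr m (by have := ngeIdx_gt arr j; omega) hm')]
        rw [takeCount_drop_jump arr v j hj hle, skipIdx_step arr v j hj hle]
        congr 1; ring
      · simp only [csleA_pop, if_neg hle]
        rw [takeCount_drop_stop arr v j hj hle,
          skipIdx_stop arr v j (by tauto), chainL_cons arr j hj]
        simp
    · rw [skipIdx_stop arr v j (by tauto), chainL_nil arr j hj,
        takeCount_drop_end arr v j (by omega)]
      simp [csleA_pop]

-- skipIdx from i+1 with v = arr[i] is exactly ngeIdx i
lemma skipIdx_succ (arr : List Int) (k : Nat) :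
    skipIdx arr (arr.getD k 0) (k+1) = ngeIdx arr k := by
  rw [skipIdx_eq arr _ (arr.length) (k+1) (by omega)]
  unfold ngeIdx specCnt; omega

-- updating position k with its intended value keeps the result array correct
lemma set_correct (arr : List Int) (r : List Int) (k : Nat)
    (hlen : r.length = arr.length) (hk : k < arr.length)
    (hr : ∀ m, k + 1 ≤ m → m < arr.length → r.getD m 0 = specCnt arr m) :
    ∀ m, k ≤ m → m < arr.length → (r.set k (specCnt arr k)).getD m 0 = specCnt arr m := by
  intro m hm hm'
  rw [List.getD_eq_getElem _ 0 (by rw [List.length_set]; omega)]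
  rw [List.getElem_set]
  by_cases hmk : k = m
  · subst hmk; simp
  · rw [if_neg hmk, ← List.getD_eq_getElem _ 0 (by omega)]
    exact hr m (by omega) hm'

-- A's outer loop invariant
lemma A_outer_inv (arr : List Int) : ∀ k (r : List Int), k ≤ arr.length →
    r.length = arr.length →
    (∀ m, k ≤ m → m < arr.length → r.getD m 0 = specCnt arr m) →
    (csleA_outer arr k r (chainL arr k)).length = arr.length ∧
    (∀ m, m < arr.length → (csleA_outer arr k r (chainL arr k)).getD m 0 = specCnt arr m) := by
  intro k
  induction k with
  | zero =>
    intro r _ hlen hr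
    exact ⟨by simpa [csleA_outer] using hlen,
      fun m hm => by simpa [csleA_outer] using hr m (by omega) hm⟩
  | succ k ih =>
    intro r hk hlen hr
    have hkn : k < arr.length := by omega
    simp only [csleA_outer]
    rw [pop_chain arr (arr.getD k 0) arr.length (k+1) r 0 (by omega) hr]
    dsimp only
    rw [skipIdx_succ arr k, ← chainL_cons arr k hkn]
    have hcount : (0 : Int) + takeCount (arr.getD k 0) (arr.drop (k+1)) = specCnt arr k := by
      unfold specCnt; ring
    simp only [hcount]
    exact ih (r.set k (specCnt arr k)) (by omega) (by simpa using hlen)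
      (set_correct arr r k hlen hkn hr)

-- B's jump loop computes skipIdx when the result array is correct to the right
lemma B_jump_eq (arr : List Int) (v : Int) : ∀ fuel j (res : List Int),
    arr.length - j ≤ fuel →
    (∀ m, j ≤ m → m < arr.length → res.getD m 0 = specCnt arr m) →
    csleB_jump arr res v arr.length fuel j = skipIdx arr v j := by
  intro fuel
  induction fuel with
  | zero =>
    intro j res hf _
    rw [skipIdx_stop arr v j (by omega)]
    rfl
  | succ f ih =>
    intro j res hf hres
    by_cases hcond : j < arr.length ∧ arr.getD j 0 ≤ v
    · simp only [csleB_jump, if_pos hcond]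
      have hj' : j + (res.getD j 0).toNat + 1 = ngeIdx arr j := by
        rw [hres j le_rfl hcond.1]; unfold ngeIdx; omega
      rw [hj']
      rw [ih (ngeIdx arr j) res (by have := ngeIdx_gt arr j; omega)
        (fun m hm hm' => hres m (by have := ngeIdx_gt arr j; omega) hm')]
      rw [skipIdx_step arr v j hcond.1 hcond.2]
    · simp only [csleB_jump, if_neg hcond]
      rw [skipIdx_stop arr v j hcond]

-- B's outer loop invariant
lemma B_outer_inv (arr : List Int) : ∀ k (res : List Int), k ≤ arr.length →
    res.length = arr.length →
    (∀ m, k ≤ m → m < arr.length → res.getD m 0 = specCnt arr m) →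
    (csleB_outer arr arr.length k res).length = arr.length ∧
    (∀ m, m < arr.length → (csleB_outer arr arr.length k res).getD m 0 = specCnt arr m) := by
  intro k
  induction k with
  | zero =>
    intro res _ hlen hres
    exact ⟨by simpa [csleB_outer] using hlen,
      fun m hm => by simpa [csleB_outer] using hres m (by omega) hm⟩
  | succ k ih =>
    intro res hk hlen hres
    have hkn : k < arr.length := by omega
    simp only [csleB_outer]
    rw [B_jump_eq arr (arr.getD k 0) arr.length (k+1) res (by omega) hres]
    rw [skipIdx_succ arr k]
    have hval : ((ngeIdx arr k : Int)) - k - 1 = specCnt arr k := by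
      have := takeCount_nonneg (arr.getD k 0) (arr.drop (k+1))
      unfold ngeIdx specCnt at *
      omega
    rw [hval]
    exact ih (res.set k (specCnt arr k)) (by omega) (by simpa using hlen)
      (set_correct arr res k hlen hkn hres)

lemma chainL_len (arr : List Int) : chainL arr arr.length = [] := by
  rw [chainL]; simp

-- ===== VERDICT (by name: the statement is the Claim_ definition above) =====
theorem count_subsequent_lower_or_equal_spec : Claim_equal_count_subsequent_lower_or_equal := by
  intro arr _
  unfold Spec_count_subsequent_lower_or_equal
  unfold count_subsequent_lower_or_equal count_subsequent_lower_or_equal_alt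
  have hinit : ∀ m, arr.length ≤ m → m < arr.length →
      (List.replicate arr.length (0 : Int)).getD m 0 = specCnt arr m := by
    intro m hm hm'; omega
  have hA := A_outer_inv arr arr.length (List.replicate arr.length 0) le_rfl (by simp) hinit
  rw [chainL_len arr] at hA
  have hB := B_outer_inv arr arr.length (List.replicate arr.length 0) le_rfl (by simp) hinit
  apply List.ext_getElem (by rw [hA.1, hB.1])
  intro i h1 h2
  have hi : i < arr.length := by rw [hA.1] at h1; exact h1
  have := hA.2 i hi
  have := hB.2 i hi
  rw [List.getD_eq_getElem _ 0 h1, List.getD_eq_getElem _ 0 h2] at *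
  omega
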